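-- pv_equiv track=rewrite | github.com/MaibornWolff/hybrid-cloud-postgresql-operator | hybridcloud/util/password.py | _check_contains
-- ===== SOURCE A (Python) =====
-- import string
--
-- SPECIAL_CHARACTERS = "+-_.:<>?"
--
-- def _check_contains(password, special_chars):
--     groups = [string.ascii_lowercase, string.ascii_uppercase, string.digits]
--     if special_chars:
--         groups.append(SPECIAL_CHARACTERS)
--     for group in groups:
--         contains = False
--         for char in group:
--             if char in password:
--                 contains = True
--                 break
--         if not contains:
--             return False
--     return True
-- ===== SOURCE B (Python) =====
-- import string
--
-- SPECIAL_CHARACTERS = "+-_.:<>?"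
--
-- def _check_contains(password, special_chars):
--     has_lower = has_upper = has_digit = has_special = False
--     for ch in password:
--         if ch in string.ascii_lowercase:
--             has_lower = True
--         if ch in string.ascii_uppercase:
--             has_upper = True
--         if ch in string.digits:
--             has_digit = True
--         if ch in SPECIAL_CHARACTERS:
--             has_special = True
--     if special_chars:
--         return has_lower and has_upper and has_digit and has_special
--     return has_lower and has_upper and has_digit
-- ===== Notes on version B (the rewrite author's own statement) =====
-- stated objective: alternative
-- what changed: Inverted the traversal: instead of scanning the password once per character group (A's nested loops), B makes a single pass over the password, setting a boolean per group, and checks the required flags at the end.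
import Mathlib
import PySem

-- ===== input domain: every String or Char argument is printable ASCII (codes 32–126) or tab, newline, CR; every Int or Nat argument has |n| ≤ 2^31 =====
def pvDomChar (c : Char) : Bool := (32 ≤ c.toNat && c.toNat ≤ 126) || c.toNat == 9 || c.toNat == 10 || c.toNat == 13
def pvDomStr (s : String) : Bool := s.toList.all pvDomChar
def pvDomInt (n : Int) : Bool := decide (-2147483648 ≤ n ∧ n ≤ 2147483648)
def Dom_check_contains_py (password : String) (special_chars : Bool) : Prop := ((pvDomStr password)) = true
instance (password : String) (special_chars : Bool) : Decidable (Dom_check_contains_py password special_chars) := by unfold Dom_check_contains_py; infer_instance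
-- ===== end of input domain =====

-- B makes a single pass over the password setting one boolean per character group,
-- instead of A's scan of the password once per group; alternative decomposition, same result.

-- ===== PORT A =====
def pvLower : List Char := "abcdefghijklmnopqrstuvwxyz".toList
def pvUpper : List Char := "ABCDEFGHIJKLMNOPQRSTUVWXYZ".toList
def pvDigits : List Char := "0123456789".toList
def pvSpecial : List Char := "+-_.:<>?".toList

-- A's inner 'for char in group: if char in password: contains = True; break' is the
-- flag-with-break pattern = List.any over the group ('char in password' on a single char
-- is exactly list membership of the char in the password's characters).
def pvCheckGroups (password : List Char) : List (List Char) → Bool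
  | [] => true
  | g :: gs => if g.any (fun c => password.contains c) then pvCheckGroups password gs else false

def check_contains_py (password : String) (special_chars : Bool) : Bool :=
  let groups := [pvLower, pvUpper, pvDigits]
  let groups := if special_chars then groups ++ [pvSpecial] else groups
  pvCheckGroups password.toList groups

-- ===== PORT B =====
-- state = (has_lower, has_upper, has_digit, has_special); one loop body iteration
def pvStep (st : Bool × Bool × Bool × Bool) (ch : Char) : Bool × Bool × Bool × Bool :=
  let st := if pvLower.contains ch then (true, st.2.1, st.2.2.1, st.2.2.2) else st
  let st := if pvUpper.contains ch then (st.1, true, st.2.2.1, st.2.2.2) else st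
  let st := if pvDigits.contains ch then (st.1, st.2.1, true, st.2.2.2) else st
  if pvSpecial.contains ch then (st.1, st.2.1, st.2.2.1, true) else st

def check_contains_py_alt (password : String) (special_chars : Bool) : Bool :=
  let s := password.toList.foldl pvStep (false, false, false, false)
  if special_chars then s.1 && s.2.1 && s.2.2.1 && s.2.2.2
  else s.1 && s.2.1 && s.2.2.1

-- ===== PRECONDITION & SPEC =====
def Spec_check_contains_py (password : String) (special_chars : Bool) (out : Bool) : Prop := out = check_contains_py_alt password special_chars
instance (password : String) (special_chars : Bool) (out : Bool) : Decidable (Spec_check_contains_py password special_chars out) := by unfold Spec_check_contains_py; infer_instance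

-- ===== CLAIM (what is proved, stated in full; the proofs are below) =====
def Claim_equal_check_contains_py : Prop := ∀ (password : String) (special_chars : Bool), Dom_check_contains_py password special_chars → Spec_check_contains_py password special_chars (check_contains_py password special_chars)

-- ===== LEMMAS AND PROOFS =====

theorem pvStep_eq (st : Bool × Bool × Bool × Bool) (ch : Char) :
    pvStep st ch = (st.1 || pvLower.contains ch, st.2.1 || pvUpper.contains ch,
      st.2.2.1 || pvDigits.contains ch, st.2.2.2 || pvSpecial.contains ch) := by
  unfold pvStep
  cases hL : pvLower.contains ch <;> cases hU : pvUpper.contains ch <;>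
    cases hD : pvDigits.contains ch <;> cases hS : pvSpecial.contains ch <;> simp

theorem pvFoldl_eq (p : List Char) (a b c d : Bool) :
    p.foldl pvStep (a, b, c, d) =
      (a || p.any (fun ch => pvLower.contains ch), b || p.any (fun ch => pvUpper.contains ch),
       c || p.any (fun ch => pvDigits.contains ch), d || p.any (fun ch => pvSpecial.contains ch)) := by
  induction p generalizing a b c d with
  | nil => simp
  | cons ch p ih =>
    simp only [List.foldl_cons, pvStep_eq, ih, List.any_cons]
    simp [Bool.or_assoc]

theorem pvSwap (g p : List Char) :
    g.any (fun c => p.contains c) = p.any (fun c => g.contains c) := by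
  rw [Bool.eq_iff_iff]
  simp only [List.any_eq_true, List.contains_iff_mem]
  exact ⟨fun ⟨x, h1, h2⟩ => ⟨x, h2, h1⟩, fun ⟨x, h1, h2⟩ => ⟨x, h2, h1⟩⟩

theorem pvCheckGroups_eq (p : List Char) (gs : List (List Char)) :
    pvCheckGroups p gs = gs.all (fun g => p.any (fun c => g.contains c)) := by
  induction gs with
  | nil => rfl
  | cons g gs ih =>
    rw [List.all_cons, ← ih, ← pvSwap]
    show (if g.any (fun c => p.contains c) then pvCheckGroups p gs else false) = _
    cases h : g.any (fun c => p.contains c) <;> simp only [h, if_true, if_false, Bool.false_eq_true, Bool.true_and, Bool.false_and]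

-- ===== VERDICT (by name: the statement is the Claim_ definition above) =====
theorem check_contains_py_spec : Claim_equal_check_contains_py := by
  intro password special_chars _
  unfold Spec_check_contains_py check_contains_py check_contains_py_alt
  rw [pvFoldl_eq, pvCheckGroups_eq]
  cases special_chars <;>
    simp only [Bool.false_eq_true, eq_self_iff_true, if_true, if_false,
      List.all_cons, List.all_nil, List.all_append, Bool.and_true,
      Bool.false_or, Bool.and_assoc]
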